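-- pv_equiv track=rewrite | github.com/MeetKai/functionary | functionary/train/packing/packed_dataset.py | pack_data_points_by_length
-- ===== SOURCE A (Python) =====
-- from typing import List, Dict, Any
--
-- def pack_data_points_by_length(
--     lengths: List[int], max_length: int, max_size: int = -1
-- ) -> List[List[int]]:
--     """given lengths of data points, we merge consecutive data points into a new data point, as long as the concatenated length is less than max_length
--     Args:
--         lengths (List[int]): List of lengths of data points
--         max_length (int): the concatenated length must be less than or equal max_length
--         max_size: if != -1; the maximum number of consecutive items being merged; max_size: -1 --> no limit for number of items being merged
--
--     max_size: the maximum number of data points being merged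
--     For example, lengths=[1, 3, 2, 2, 6, 4, 2, 6, 5]; max_length=10
--     if max_size=-1 --> [[0,1,2,3], [4, 5], [6,7], [8]]
--     if max_size=3 --> [[0,1,2], [3,4], [5, 6], [7], [8]]
--
--     Returns:
--         _type_: groups of indices: [[index1, index2, ...], [], ...]
--     """
--     result = []
--     current_concatenated_length = 0
--     current_list = []
--     for i in range(len(lengths)):
--         cur_length = lengths[i]
--         if cur_length + current_concatenated_length <= max_length and (
--             max_size == -1 or len(current_list) < max_size
--         ):
--             current_concatenated_length += cur_length
--             current_list.append(i)
--         else:  # current_list is done, create a new one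
--             if len(current_list) > 0:
--                 result.append(current_list)
--             current_list = [i]
--             current_concatenated_length = cur_length
--
--     if len(current_list) > 0:
--         result.append(current_list)
--
--     # assert to make sure no indices were missing
--     assert sum([len(indices) for indices in result]) == len(lengths)
--     return result
-- ===== SOURCE B (Python) =====
-- def pack_data_points_by_length(lengths, max_length, max_size=-1):
--     # Staged: prefix sums -> list of cut points -> groups materialized as ranges.
--     n = len(lengths)
--     prefix = [0]
--     acc = 0
--     for x in lengths:
--         acc += x
--         prefix.append(acc)
--     cuts = [0]
--     while cuts[-1] < n:
--         s = cuts[-1]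
--         hard = n if max_size == -1 else min(n, s + max(max_size, 1))
--         e = next((j for j in range(s + 1, hard)
--                   if prefix[j + 1] - prefix[s] > max_length), hard)
--         cuts.append(e)
--     return [list(range(a, b)) for a, b in zip(cuts, cuts[1:])]
-- ===== Notes on version B (the rewrite author's own statement) =====
-- stated objective: alternative
-- what changed: Replaced A's single stateful pass (result / current list / current length with flush-on-overflow) by a staged computation: build a prefix-sum array, compute the list of group cut points (each next cut found as the first index whose prefix-sum difference overflows, capped by the max-size bound), then materialize the groups as ranges between consecutive cuts.
import Mathlib
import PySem

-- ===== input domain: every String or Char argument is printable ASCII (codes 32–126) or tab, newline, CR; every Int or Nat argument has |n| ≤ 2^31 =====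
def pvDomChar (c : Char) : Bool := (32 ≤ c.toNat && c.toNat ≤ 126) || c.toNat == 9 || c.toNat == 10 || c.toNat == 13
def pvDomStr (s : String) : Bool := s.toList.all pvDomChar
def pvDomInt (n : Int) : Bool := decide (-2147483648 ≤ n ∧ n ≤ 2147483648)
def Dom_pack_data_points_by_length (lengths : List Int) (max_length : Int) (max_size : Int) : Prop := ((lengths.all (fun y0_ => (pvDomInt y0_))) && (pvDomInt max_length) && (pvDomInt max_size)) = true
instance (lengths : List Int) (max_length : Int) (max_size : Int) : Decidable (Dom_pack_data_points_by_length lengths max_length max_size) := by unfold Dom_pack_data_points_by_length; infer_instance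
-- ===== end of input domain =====

-- B replaces A's single stateful pass (flush-on-overflow accumulator) by staged passes:
-- prefix sums, then a list of group cut points, then groups materialized as ranges
-- between consecutive cuts (objective: alternative decomposition, same cost).

-- ===== PORT A =====
-- state = (result, current_concatenated_length, current_list); indices i are always
-- in range, so lengths[i] is ported as pyGetD with an unused default.
def pvAStep (lengths : List Int) (max_length max_size : Int)
    (st : List (List Int) × Int × List Int) (i : Int) : List (List Int) × Int × List Int :=
  let cur_length := PySem.List.pyGetD lengths i 0
  if cur_length + st.2.1 ≤ max_length ∧ (max_size = -1 ∨ (st.2.2.length : Int) < max_size) then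
    (st.1, st.2.1 + cur_length, st.2.2 ++ [i])
  else
    ((if st.2.2.length > 0 then st.1 ++ [st.2.2] else st.1), cur_length, [i])

-- A's final assert always holds (every index is placed in exactly one group), so it is
-- ported as the identity.
def pack_data_points_by_length (lengths : List Int) (max_length : Int) (max_size : Int) : List (List Int) :=
  let st := (PySem.List.pyRange 0 lengths.length 1).foldl (pvAStep lengths max_length max_size) ([], 0, [])
  if st.2.2.length > 0 then st.1 ++ [st.2.2] else st.1

-- ===== PORT B =====
-- 'prefix = [0]; acc = 0; for x in lengths: acc += x; prefix.append(acc)'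
def pvPrefix (lengths : List Int) : List Int :=
  (lengths.foldl (fun st x => (st.1 ++ [st.2 + x], st.2 + x)) (([(0 : Int)] : List Int), (0 : Int))).1

-- 'hard = n if max_size == -1 else min(n, s + max(max_size, 1))'
-- (s + max(max_size,1) ≥ s+1 ≥ 0, so the Nat arithmetic below is the Python value exactly)
def pvHard (n s : Nat) (max_size : Int) : Nat :=
  if max_size = -1 then n else min n (s + (max max_size 1).toNat)

-- 'next((j for j in range(j0, hard) if prefix[j+1] - prefix[s] > max_length), hard)'
-- fuel = hard - j0, so running out of fuel returns hard, the generator's default.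
def pvScan (P : List Int) (max_length : Int) (s : Nat) : Nat → Nat → Nat
  | 0, j => j
  | fuel + 1, j =>
    if max_length < PySem.List.pyGetD P ((j : Int) + 1) 0 - PySem.List.pyGetD P (s : Int) 0 then j
    else pvScan P max_length s fuel (j + 1)

def pvNextCut (n : Nat) (P : List Int) (max_length max_size : Int) (s : Nat) : Nat :=
  pvScan P max_length s (pvHard n s max_size - (s + 1)) (s + 1)

-- 'cuts = [0]; while cuts[-1] < n: cuts.append(e)'; fuel bounds the number of groups.
def pvCuts (n : Nat) (P : List Int) (max_length max_size : Int) : Nat → Nat → List Nat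
  | 0, s => [s]
  | fuel + 1, s =>
    if s < n then s :: pvCuts n P max_length max_size fuel (pvNextCut n P max_length max_size s)
    else [s]

-- '[list(range(a, b)) for a, b in zip(cuts, cuts[1:])]'
def pvRanges (cs : List Nat) : List (List Int) :=
  (cs.zip cs.tail).map (fun p => PySem.List.pyRange (p.1 : Int) (p.2 : Int) 1)

def pack_data_points_by_length_alt (lengths : List Int) (max_length : Int) (max_size : Int) : List (List Int) :=
  pvRanges (pvCuts lengths.length (pvPrefix lengths) max_length max_size lengths.length 0)

-- ===== PRECONDITION & SPEC =====
def Spec_pack_data_points_by_length (lengths : List Int) (max_length : Int) (max_size : Int) (out : List (List Int)) : Prop := out = pack_data_points_by_length_alt lengths max_length max_size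
instance (lengths : List Int) (max_length : Int) (max_size : Int) (out : List (List Int)) : Decidable (Spec_pack_data_points_by_length lengths max_length max_size out) := by unfold Spec_pack_data_points_by_length; infer_instance

-- ===== CLAIM (what is proved, stated in full; the proofs are below) =====
def Claim_equal_pack_data_points_by_length : Prop := ∀ (lengths : List Int) (max_length : Int) (max_size : Int), Dom_pack_data_points_by_length lengths max_length max_size → Spec_pack_data_points_by_length lengths max_length max_size (pack_data_points_by_length lengths max_length max_size)

-- ===== LEMMAS AND PROOFS =====

def pvPsum (lengths : List Int) (k : Nat) : Int := (lengths.take k).sum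

def pvFin (st : List (List Int) × Int × List Int) : List (List Int) :=
  if st.2.2.length > 0 then st.1 ++ [st.2.2] else st.1

theorem pvPrefix_fold (l : List Int) : ∀ (pre : List Int) (a : Int),
    (l.foldl (fun st x => (st.1 ++ [st.2 + x], st.2 + x)) (pre, a)).1
      = pre ++ (List.range l.length).map (fun k => a + (l.take (k + 1)).sum) := by
  induction l with
  | nil => intro pre a; simp
  | cons x xs ih =>
    intro pre a
    simp only [List.foldl_cons, ih, List.length_cons, List.range_succ_eq_map,
      List.map_cons, List.map_map]
    simp [Function.comp, List.take_succ_cons, add_assoc, List.append_assoc]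

theorem pvPrefix_eq (lengths : List Int) :
    pvPrefix lengths = (List.range (lengths.length + 1)).map (fun k => pvPsum lengths k) := by
  unfold pvPrefix pvPsum
  rw [pvPrefix_fold]
  simp [List.range_succ_eq_map, List.map_map, Function.comp]

theorem pvGetP (lengths : List Int) (k : Nat) (hk : k ≤ lengths.length) :
    PySem.List.pyGetD (pvPrefix lengths) (k : Int) 0 = pvPsum lengths k := by
  rw [pvPrefix_eq, PySem.List.pyGetD_natCast]
  rw [List.getD_eq_getElem?_getD, List.getElem?_map, List.getElem?_range (by omega)]
  rfl

theorem pvGetL (lengths : List Int) (j : Nat) (hj : j < lengths.length) :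
    PySem.List.pyGetD lengths (j : Int) 0 = pvPsum lengths (j + 1) - pvPsum lengths j := by
  rw [PySem.List.pyGetD_natCast, List.getD_eq_getElem?_getD, List.getElem?_eq_getElem hj]
  unfold pvPsum
  rw [List.sum_take_succ lengths j hj]
  simp

theorem pvRange_length (s j : Nat) :
    (PySem.List.pyRange (s : Int) (j : Int) 1).length = j - s := by
  rw [PySem.List.length_pyRange_one]; omega

theorem pvScan_ge (P : List Int) (ml : Int) (s : Nat) :
    ∀ fuel j, j ≤ pvScan P ml s fuel j := by
  intro fuel
  induction fuel with
  | zero => intro j; simp [pvScan]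
  | succ f ih =>
    intro j
    simp only [pvScan]
    split
    · exact le_refl j
    · exact le_trans (by omega) (ih (j + 1))

theorem pvHard_ge (n s : Nat) (ms : Int) (h : s < n) : s + 1 ≤ pvHard n s ms := by
  unfold pvHard
  split
  · omega
  · have h1 : (1 : Int) ≤ max ms 1 := le_max_right _ _
    omega

theorem pvHard_le (n s : Nat) (ms : Int) : pvHard n s ms ≤ n := by
  unfold pvHard; split <;> omega

theorem pvCuts_stop (n : Nat) (P : List Int) (ml ms : Int) (fuel s : Nat) (h : n ≤ s) :
    pvCuts n P ml ms fuel s = [s] := by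
  cases fuel with
  | zero => rfl
  | succ f => simp [pvCuts, Nat.not_lt.mpr h]

theorem pvCuts_congr (n : Nat) (P : List Int) (ml ms : Int) :
    ∀ f1 f2 s, n - s ≤ f1 → n - s ≤ f2 →
      pvCuts n P ml ms f1 s = pvCuts n P ml ms f2 s := by
  intro f1
  induction f1 with
  | zero =>
    intro f2 s h1 _
    rw [pvCuts_stop _ _ _ _ _ _ (by omega), pvCuts_stop _ _ _ _ _ _ (by omega)]
  | succ f ih =>
    intro f2 s h1 h2
    cases f2 with
    | zero =>
      rw [pvCuts_stop _ _ _ _ _ _ (by omega), pvCuts_stop _ _ _ _ _ _ (by omega)]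
    | succ f' =>
      simp only [pvCuts]
      by_cases hs : s < n
      · rw [if_pos hs, if_pos hs]
        have hge : s + 1 ≤ pvNextCut n P ml ms s := pvScan_ge P ml s _ (s + 1)
        rw [ih f' _ (by omega) (by omega)]
      · rw [if_neg hs, if_neg hs]

theorem pvCuts_shape (n : Nat) (P : List Int) (ml ms : Int) (fuel s : Nat) :
    ∃ t, pvCuts n P ml ms fuel s = s :: t := by
  cases fuel with
  | zero => exact ⟨[], rfl⟩
  | succ f =>
    simp only [pvCuts]
    split
    · exact ⟨_, rfl⟩
    · exact ⟨[], rfl⟩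

theorem pvRanges_cons (a : Nat) (n : Nat) (P : List Int) (ml ms : Int) (fuel s : Nat) :
    pvRanges (a :: pvCuts n P ml ms fuel s)
      = PySem.List.pyRange (a : Int) (s : Int) 1 :: pvRanges (pvCuts n P ml ms fuel s) := by
  obtain ⟨t, ht⟩ := pvCuts_shape n P ml ms fuel s
  rw [ht]
  rfl

theorem pvRanges_cons2 (a b : Nat) (t : List Nat) :
    pvRanges (a :: b :: t) = PySem.List.pyRange (a : Int) (b : Int) 1 :: pvRanges (b :: t) := rfl

-- Main invariant: finalizing A's fold over the remaining indices, started in the state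
-- 'group s..j-1 in progress', equals res ++ B's ranges of the cuts from s (scan resumed at j).
theorem pvMain (lengths : List Int) (ml ms : Int) :
    ∀ fuel (s j : Nat) (res : List (List Int)),
      s < j → j ≤ pvHard lengths.length s ms → j ≤ lengths.length →
      lengths.length - j ≤ fuel →
      pvFin ((PySem.List.pyRange (j : Int) (lengths.length : Int) 1).foldl
          (pvAStep lengths ml ms)
          (res, pvPsum lengths j - pvPsum lengths s, PySem.List.pyRange (s : Int) (j : Int) 1))
        = res ++ pvRanges (s :: pvCuts lengths.length (pvPrefix lengths) ml ms
            (lengths.length - s)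
            (pvScan (pvPrefix lengths) ml s (pvHard lengths.length s ms - j) j)) := by
  intro fuel
  induction fuel with
  | zero =>
    intro s j res hsj hjh hjn hf
    have hjn' : j = lengths.length := by omega
    have hh : pvHard lengths.length s ms = j := by
      have := pvHard_le lengths.length s ms; omega
    rw [show PySem.List.pyRange (j : Int) (lengths.length : Int) 1 = []
      from PySem.List.pyRange_one_eq_nil (by omega)]
    rw [hh, Nat.sub_self]
    simp only [pvScan, List.foldl_nil]
    rw [pvCuts_stop _ _ _ _ _ _ (by omega)]
    simp only [pvFin, pvRanges]
    rw [pvRange_length]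
    simp [List.zip_cons_cons, Nat.sub_pos_iff_lt.mpr (by omega : s < j)]
  | succ fuel ih =>
    intro s j res hsj hjh hjn hf
    by_cases hj : j < lengths.length
    · rw [show PySem.List.pyRange (j : Int) (lengths.length : Int) 1
          = (j : Int) :: PySem.List.pyRange ((j : Int) + 1) (lengths.length : Int) 1
        from PySem.List.pyRange_one_cons (by exact_mod_cast hj)]
      simp only [List.foldl_cons]
      have hcast : ((j : Int) + 1) = ((j + 1 : Nat) : Int) := by push_cast; ring
      rw [hcast]
      set cond := (pvPsum lengths (j + 1) - pvPsum lengths s ≤ ml ∧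
        (ms = -1 ∨ ((j : Int) - (s : Int)) < ms)) with hcond
      have hstep : pvAStep lengths ml ms
          (res, pvPsum lengths j - pvPsum lengths s, PySem.List.pyRange (s : Int) (j : Int) 1) (j : Int)
          = if cond then
              (res, pvPsum lengths (j + 1) - pvPsum lengths s,
                PySem.List.pyRange (s : Int) ((j + 1 : Nat) : Int) 1)
            else
              (res ++ [PySem.List.pyRange (s : Int) (j : Int) 1],
                pvPsum lengths (j + 1) - pvPsum lengths j,
                PySem.List.pyRange (j : Int) ((j + 1 : Nat) : Int) 1) := by
      -- translate A's branch condition into cond and its updates into psum form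
        simp only [pvAStep, pvGetL lengths j hj, pvRange_length]
        have hlen : (((j : Nat) - s : Nat) : Int) = (j : Int) - (s : Int) := by omega
        have hiff : (pvPsum lengths (j + 1) - pvPsum lengths j +
            (pvPsum lengths j - pvPsum lengths s) ≤ ml ∧
            (ms = -1 ∨ (((j : Nat) - s : Nat) : Int) < ms)) ↔ cond := by
          rw [hcond, hlen]
          constructor <;> intro h <;> exact ⟨by linarith [h.1], h.2⟩
        rw [if_congr hiff rfl rfl]
        split
        · have : pvPsum lengths j - pvPsum lengths s +
              (pvPsum lengths (j + 1) - pvPsum lengths j) = pvPsum lengths (j + 1) - pvPsum lengths s := by ring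
          rw [this, ← hcast, ← PySem.List.pyRange_one_succ_right (by exact_mod_cast Nat.le_of_lt hsj)]
        · have hpos : 0 < j - s := by omega
          rw [if_pos hpos, ← hcast, PySem.List.pyRange_one_singleton]
      rw [hstep]
      -- the scan mirrors A's branch: advance on accept, stop at j on reject
      have hescan : pvScan (pvPrefix lengths) ml s (pvHard lengths.length s ms - j) j
          = if cond then
              pvScan (pvPrefix lengths) ml s (pvHard lengths.length s ms - (j + 1)) (j + 1)
            else j := by
        by_cases hcut : j < pvHard lengths.length s ms
        · obtain ⟨k, hk⟩ : ∃ k, pvHard lengths.length s ms - j = k + 1 := ⟨pvHard lengths.length s ms - (j + 1), by omega⟩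
          rw [hk]
          simp only [pvScan]
          rw [hcast, pvGetP lengths (j + 1) (by omega), pvGetP lengths s (by omega)]
          have hk' : k = pvHard lengths.length s ms - (j + 1) := by omega
          by_cases hov : ml < pvPsum lengths (j + 1) - pvPsum lengths s
          · rw [if_pos hov, if_neg (by rw [hcond]; intro h; omega)]
          · rw [if_neg hov, hk']
            have hcondT : cond := by
              rw [hcond]
              refine ⟨by omega, ?_⟩
              unfold pvHard at hcut
              by_cases hm1 : ms = -1
              · exact Or.inl hm1
              · rw [if_neg hm1] at hcut
                right
                have h1 : (1 : Int) ≤ max ms 1 := le_max_right _ _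
                have h2 : j - s < (max ms 1).toNat := by omega
                rcases max_choice ms 1 with hmx | hmx <;> omega
            rw [if_pos hcondT]
        · have hjeq : j = pvHard lengths.length s ms := by omega
          rw [← hjeq, Nat.sub_self]
          simp only [pvScan]
          have hcondF : ¬ cond := by
            rw [hcond]
            rintro ⟨-, hsz⟩
            unfold pvHard at hjeq
            rcases hsz with hm1 | hlt
            · rw [if_pos hm1] at hjeq; omega
            · have hm1 : ms ≠ -1 := by intro h; omega
              rw [if_neg hm1] at hjeq
              have h1 : (1 : Int) ≤ max ms 1 := le_max_right _ _
              rcases max_choice ms 1 with hmx | hmx <;> omega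
          rw [if_neg hcondF]
      by_cases hc : cond
      · rw [if_pos hc] at hstep ⊢
        rw [hescan, if_pos hc]
        exact ih s (j + 1) res (by omega)
          (by -- cond gives j < hard, so j+1 ≤ hard
            by_contra hcon
            have hjeq : j = pvHard lengths.length s ms := by omega
            rw [← hjeq, Nat.sub_self] at hescan
            simp only [if_pos hc, show j - (j + 1) = 0 from by omega, pvScan] at hescan
            omega)
          (by omega) (by omega)
      · rw [if_neg hc] at hstep ⊢
        rw [hescan, if_neg hc]
        have hrec := ih j (j + 1) (res ++ [PySem.List.pyRange (s : Int) (j : Int) 1])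
          (by omega) (pvHard_ge lengths.length j ms hj) (by omega) (by omega)
        rw [hrec]
        -- unfold B's cuts one step at s: cuts from s = s :: cuts from nextCut s (= j here)
        obtain ⟨m, hm⟩ : ∃ m, lengths.length - s = m + 1 := ⟨lengths.length - s - 1, by omega⟩
        rw [hm]
        simp only [pvCuts]
        rw [if_pos hj]
        have hnext : j + 1 ≤ pvNextCut lengths.length (pvPrefix lengths) ml ms j := by
          have := pvScan_ge (pvPrefix lengths) ml j
            (pvHard lengths.length j ms - (j + 1)) (j + 1)
          unfold pvNextCut; omega
        rw [pvCuts_congr _ _ _ _ m (lengths.length - j) _ (by omega) (by omega)]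
        unfold pvNextCut
        simp only [pvRanges_cons2, pvRanges_cons]
        simp [List.append_assoc]
    · -- j = lengths.length: same as the base case
      have hjn' : j = lengths.length := by omega
      have hh : pvHard lengths.length s ms = j := by
        have := pvHard_le lengths.length s ms; omega
      rw [show PySem.List.pyRange (j : Int) (lengths.length : Int) 1 = []
        from PySem.List.pyRange_one_eq_nil (by omega)]
      rw [hh, Nat.sub_self]
      simp only [pvScan, List.foldl_nil]
      rw [pvCuts_stop _ _ _ _ _ _ (by omega)]
      simp only [pvFin, pvRanges]
      rw [pvRange_length]
      simp [List.zip_cons_cons, Nat.sub_pos_iff_lt.mpr (by omega : s < j)]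

-- ===== VERDICT (by name: the statement is the Claim_ definition above) =====
theorem pack_data_points_by_length_spec : Claim_equal_pack_data_points_by_length := by
  intro lengths ml ms _hdom
  unfold Spec_pack_data_points_by_length pack_data_points_by_length pack_data_points_by_length_alt
  cases lengths with
  | nil => simp [pvCuts, pvRanges]
  | cons a as =>
    set L := a :: as with hL
    have h0 : (0 : Nat) < L.length := by simp [hL]
    rw [PySem.List.pyRange_one_cons (by exact_mod_cast h0)]
    simp only [List.foldl_cons]
    have hstep : pvAStep L ml ms ([], 0, []) (0 : Int)
        = ([], pvPsum L 1 - pvPsum L 0,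
            PySem.List.pyRange ((0 : Nat) : Int) ((1 : Nat) : Int) 1) := by
      have hget : PySem.List.pyGetD L (0 : Int) 0 = pvPsum L 1 - pvPsum L 0 := by
        have := pvGetL L 0 h0
        simpa using this
      have hrng : PySem.List.pyRange ((0 : Nat) : Int) ((1 : Nat) : Int) 1 = [(0 : Int)] := by
        simpa using PySem.List.pyRange_one_singleton (0 : Int)
      simp only [pvAStep, hget, hrng]
      split <;> simp
    rw [hstep]
    have hmain := pvMain L ml ms L.length 0 1 [] (by omega)
      (pvHard_ge L.length 0 ms h0) (by omega) (by omega)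
    rw [show pvFin ((PySem.List.pyRange ((1 : Nat) : Int) (L.length : Int) 1).foldl
          (pvAStep L ml ms) ([], pvPsum L 1 - pvPsum L 0,
            PySem.List.pyRange ((0 : Nat) : Int) ((1 : Nat) : Int) 1)) =
        (if ((PySem.List.pyRange ((1 : Nat) : Int) (L.length : Int) 1).foldl (pvAStep L ml ms)
              ([], pvPsum L 1 - pvPsum L 0,
                PySem.List.pyRange ((0 : Nat) : Int) ((1 : Nat) : Int) 1)).2.2.length > 0 then
          ((PySem.List.pyRange ((1 : Nat) : Int) (L.length : Int) 1).foldl (pvAStep L ml ms)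
              ([], pvPsum L 1 - pvPsum L 0,
                PySem.List.pyRange ((0 : Nat) : Int) ((1 : Nat) : Int) 1)).1 ++
          [((PySem.List.pyRange ((1 : Nat) : Int) (L.length : Int) 1).foldl (pvAStep L ml ms)
              ([], pvPsum L 1 - pvPsum L 0,
                PySem.List.pyRange ((0 : Nat) : Int) ((1 : Nat) : Int) 1)).2.2]
        else ((PySem.List.pyRange ((1 : Nat) : Int) (L.length : Int) 1).foldl (pvAStep L ml ms)
              ([], pvPsum L 1 - pvPsum L 0,
                PySem.List.pyRange ((0 : Nat) : Int) ((1 : Nat) : Int) 1)).1) from rfl] at hmain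
    norm_num at hmain ⊢
    rw [hmain]
    obtain ⟨m, hm⟩ : ∃ m, L.length = m + 1 := ⟨as.length, by simp [hL]⟩
    rw [show pvCuts L.length (pvPrefix L) ml ms L.length 0
        = pvCuts L.length (pvPrefix L) ml ms (m + 1) 0 from by rw [hm]]
    simp only [pvCuts]
    rw [if_pos h0]
    have hnext0 : pvNextCut L.length (pvPrefix L) ml ms 0
        = pvScan (pvPrefix L) ml 0 (pvHard L.length 0 ms - 1) 1 := rfl
    rw [hnext0]
    have hge := pvScan_ge (pvPrefix L) ml 0 (pvHard L.length 0 ms - 1) 1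
    rw [pvCuts_congr _ _ _ _ L.length m _ (by omega) (by omega)]
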